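-- pv_equiv track=rewrite | github.com/pelinercan89/GravitationalCommunityDetection | community_detection.py | find_overlapping_nodes
-- ===== SOURCE A (Python) =====
-- def find_overlapping_nodes(sorted_communities):
--     overlapping_nodes = []  # Ortak düğümleri saklamak için bir liste
--     for index1 in range(len(sorted_communities)):
--         for index2 in range(index1 + 1, len(sorted_communities)):
--             current = sorted_communities[index1]
--             other = sorted_communities[index2]
--             common_nodes = current & other  # Ortak düğümleri bul
--             if common_nodes:
--                 overlapping_nodes.append((index1, index2, common_nodes))  # İndekslerle birlikte sakla
--     return overlapping_nodes
-- ===== SOURCE B (Python) =====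
-- def find_overlapping_nodes(sorted_communities):
--     # Inverted index: node -> list of community indices (built in index order,
--     # so each list is strictly increasing).  Only co-occurring index pairs are
--     # then considered; intersections are computed once per overlapping pair.
--     node_comms = {}
--     for i, comm in enumerate(sorted_communities):
--         for node in comm:
--             node_comms.setdefault(node, []).append(i)
--     pairs = set()
--     for idxs in node_comms.values():
--         for a in range(len(idxs)):
--             for b in range(a + 1, len(idxs)):
--                 pairs.add((idxs[a], idxs[b]))
--     return [(i, j, sorted_communities[i] & sorted_communities[j])
--             for (i, j) in sorted(pairs)]
-- ===== Notes on version B (the rewrite author's own statement) =====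
-- stated objective: alternative
-- what changed: B replaces A's scan of all C^2 community pairs by an inverted node-to-communities index: only index pairs that actually share a node are generated and intersected, and the pair list is sorted at the end to restore A's lexicographic order.
import Mathlib
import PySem

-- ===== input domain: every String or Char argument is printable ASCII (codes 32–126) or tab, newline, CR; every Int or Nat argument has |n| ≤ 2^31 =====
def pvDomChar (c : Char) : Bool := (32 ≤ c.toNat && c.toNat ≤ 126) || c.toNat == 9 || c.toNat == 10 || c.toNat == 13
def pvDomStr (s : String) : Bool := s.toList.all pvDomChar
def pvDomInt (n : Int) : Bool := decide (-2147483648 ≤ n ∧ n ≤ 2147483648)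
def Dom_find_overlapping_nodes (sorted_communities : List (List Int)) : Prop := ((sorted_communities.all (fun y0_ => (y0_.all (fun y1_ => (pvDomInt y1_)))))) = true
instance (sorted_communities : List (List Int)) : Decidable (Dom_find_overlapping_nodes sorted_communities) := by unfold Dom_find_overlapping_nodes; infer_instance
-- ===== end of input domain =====

-- B replaces A's scan of all C^2 community pairs by an inverted node→communities index: only
-- pairs that actually share a node are considered and intersected, sorted at the end.

-- ===== PORT A =====
def find_overlapping_nodes (sorted_communities : List (List Int)) : List (Int × Int × List Int) :=
  (PySem.List.pyRange 0 (PySem.List.len sorted_communities) 1).foldl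
    (fun acc index1 =>
      (PySem.List.pyRange (index1 + 1) (PySem.List.len sorted_communities) 1).foldl
        (fun acc index2 =>
          let current := PySem.List.pyGetD sorted_communities index1 []
          let other := PySem.List.pyGetD sorted_communities index2 []
          let common_nodes := PySem.Set.inter current other
          if common_nodes ≠ [] then acc ++ [(index1, index2, common_nodes)] else acc)
        acc)
    []

-- ===== PORT B =====
def find_overlapping_nodes_alt (sorted_communities : List (List Int)) : List (Int × Int × List Int) :=
  -- node_comms.setdefault(node, []).append(i)  =  modify node [] (· ++ [i])
  let node_comms : PySem.Dict Int (List Int) :=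
    (PySem.List.enumerate sorted_communities 0).foldl
      (fun d p => p.2.foldl (fun d node => d.modify node [] (fun l => l ++ [p.1])) d)
      PySem.Dict.empty
  let pairs : PySem.Set (Int × Int) :=
    node_comms.values.foldl
      (fun s idxs =>
        (PySem.List.pyRange 0 (PySem.List.len idxs) 1).foldl
          (fun s a =>
            (PySem.List.pyRange (a + 1) (PySem.List.len idxs) 1).foldl
              (fun s b =>
                PySem.Set.add s (PySem.List.pyGetD idxs a 0, PySem.List.pyGetD idxs b 0))
              s)
          s)
      PySem.Set.empty
  -- sorted(pairs): Python's tuple comparison is the lexicographic order, ported via toLex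
  (PySem.List.sorted pairs (fun p => toLex p) false).map
    (fun p => (p.1, p.2,
      PySem.Set.inter (PySem.List.pyGetD sorted_communities p.1 [])
                      (PySem.List.pyGetD sorted_communities p.2 [])))

-- ===== PRECONDITION & SPEC =====
-- The Python parameter is a list of SETS; Pre_ states the corresponding representation
-- invariant of the type convention (each inner list holds distinct elements). Inputs with
-- duplicated elements inside a community have no Python counterpart.
def Pre_find_overlapping_nodes (sorted_communities : List (List Int)) : Prop :=
  ∀ c ∈ sorted_communities, c.Nodup
instance (sorted_communities : List (List Int)) : Decidable (Pre_find_overlapping_nodes sorted_communities) := by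
  unfold Pre_find_overlapping_nodes; infer_instance
def pvWitness_find_overlapping_nodes : List (List Int) := [[1, 2], [2, 3], [4]]

def Spec_find_overlapping_nodes (sorted_communities : List (List Int)) (out : List (Int × Int × List Int)) : Prop :=
  out = find_overlapping_nodes_alt sorted_communities
instance (sorted_communities : List (List Int)) (out : List (Int × Int × List Int)) : Decidable (Spec_find_overlapping_nodes sorted_communities out) := by
  unfold Spec_find_overlapping_nodes; infer_instance

-- ===== CLAIM (what is proved, stated in full; the proofs are below) =====
def Claim_equal_find_overlapping_nodes : Prop := ∀ (sorted_communities : List (List Int)), Dom_find_overlapping_nodes sorted_communities → Pre_find_overlapping_nodes sorted_communities → Spec_find_overlapping_nodes sorted_communities (find_overlapping_nodes sorted_communities)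

-- ===== LEMMAS AND PROOFS =====

-- the common intersection expression
def pvInter (cs : List (List Int)) (i j : Int) : List Int :=
  PySem.Set.inter (PySem.List.pyGetD cs i []) (PySem.List.pyGetD cs j [])

-- the lexicographically ordered list of overlapping index pairs
def pvPairsList (cs : List (List Int)) : List (Int × Int) :=
  (PySem.List.pyRange 0 (PySem.List.len cs) 1).flatMap
    (fun i => ((PySem.List.pyRange (i + 1) (PySem.List.len cs) 1).filter
                 (fun j => decide (pvInter cs i j ≠ []))).map (fun j => (i, j)))

-- the canonical result both ports compute
def pvCanon (cs : List (List Int)) : List (Int × Int × List Int) :=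
  (pvPairsList cs).map (fun p => (p.1, p.2, pvInter cs p.1 p.2))

-- named pieces of port B
def pvNodeComms (cs : List (List Int)) : PySem.Dict Int (List Int) :=
  (PySem.List.enumerate cs 0).foldl
    (fun d p => p.2.foldl (fun d node => d.modify node [] (fun l => l ++ [p.1])) d)
    PySem.Dict.empty

def pvPairsSet (cs : List (List Int)) : PySem.Set (Int × Int) :=
  (pvNodeComms cs).values.foldl
    (fun s idxs =>
      (PySem.List.pyRange 0 (PySem.List.len idxs) 1).foldl
        (fun s a =>
          (PySem.List.pyRange (a + 1) (PySem.List.len idxs) 1).foldl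
            (fun s b =>
              PySem.Set.add s (PySem.List.pyGetD idxs a 0, PySem.List.pyGetD idxs b 0))
            s)
        s)
    PySem.Set.empty

-- the list of indices of communities containing v, in increasing order
def pvIdxList (cs : List (List Int)) (v : Int) : List Int :=
  ((PySem.List.enumerate cs 0).filter (fun p => decide (v ∈ p.2))).map (fun p => p.1)

lemma pvAlt_eq (cs : List (List Int)) :
    find_overlapping_nodes_alt cs =
      (PySem.List.sorted (pvPairsSet cs) (fun p => toLex p) false).map
        (fun p => (p.1, p.2, pvInter cs p.1 p.2)) := rfl

lemma pvA_eq_canon (cs : List (List Int)) : find_overlapping_nodes cs = pvCanon cs := by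
  simp only [find_overlapping_nodes, pvCanon, pvPairsList, pvInter,
    PySem.List.foldl_append_ite, PySem.List.foldl_append_eq_flatMap,
    List.map_flatMap, List.map_map, List.nil_append]
  rfl

lemma pvOcc_filter (v : Int) :
    ∀ (cs : List (List Int)) (s : Int), (∀ c ∈ cs, c.Nodup) →
    ((((PySem.List.enumerate cs s).flatMap (fun p => p.2.map (fun x => (x, p.1)))).filter
        (fun q => q.1 == v)).map (fun q => q.2))
      = ((PySem.List.enumerate cs s).filter (fun p => decide (v ∈ p.2))).map (fun p => p.1) := by
  intro cs
  induction cs with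
  | nil => intro s _; simp [PySem.List.enumerate_nil]
  | cons c cst ih =>
    intro s h
    have hnd : c.Nodup := h c (by simp)
    rw [PySem.List.enumerate_cons]
    simp only [List.flatMap_cons, List.filter_append, List.map_append,
      List.filter_cons, List.filter_map, List.map_map]
    rw [ih (s + 1) (fun c hc => h c (by simp [hc]))]
    -- head part
    by_cases hv : v ∈ c
    · have : c.filter (fun x => x == v) = [v] := by
        rw [List.filter_beq (l := c) (a := v), List.count_eq_one_of_mem hnd hv]; rfl
      simp [Function.comp_def, this, hv]
    · have : c.filter (fun x => x == v) = [] := by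
        rw [List.filter_beq (l := c) (a := v), List.count_eq_zero_of_not_mem hv]; rfl
      simp [Function.comp_def, this, hv]

lemma pvNodeComms_getD (cs : List (List Int)) (h : Pre_find_overlapping_nodes cs) (v : Int) :
    (pvNodeComms cs).getD v [] = pvIdxList cs v := by
  have hfold : pvNodeComms cs =
      ((PySem.List.enumerate cs 0).flatMap (fun p => p.2.map (fun x => (x, p.1)))).foldl
        (fun d q => d.modify q.1 [] (fun l => l ++ [q.2])) PySem.Dict.empty := by
    rw [List.foldl_flatMap]
    simp only [List.foldl_map]
    rfl
  rw [hfold, PySem.Dict.getD_foldl_modify_append]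
  simpa [pvIdxList, PySem.Dict.getD_empty] using pvOcc_filter v cs 0 h

lemma pvMem_idxList (cs : List (List Int)) (v i : Int) :
    i ∈ pvIdxList cs v ↔ ∃ k : Nat, ∃ _ : k < cs.length, i = (k : Int) ∧ v ∈ cs[k] := by
  simp only [pvIdxList, List.mem_map, List.mem_filter, PySem.List.mem_enumerate_iff]
  constructor
  · rintro ⟨p, ⟨⟨k, hk, rfl⟩, hv⟩, rfl⟩
    exact ⟨k, hk, by simpa using hv⟩
  · rintro ⟨k, hk, rfl, hv⟩
    exact ⟨((k : Int), cs[k]), ⟨⟨k, hk, by simp⟩, by simpa using hv⟩, rfl⟩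

lemma pvIdxList_pairwise (cs : List (List Int)) (v : Int) :
    (pvIdxList cs v).Pairwise (· < ·) := by
  unfold pvIdxList
  exact List.Pairwise.map _ (fun _ _ h => h) ((PySem.List.pairwise_lt_enumerate cs 0).filter _)

lemma pvMem_foldl_set {β : Type} (l : List β) (g : PySem.Set (Int × Int) → β → PySem.Set (Int × Int))
    (P : β → (Int × Int) → Prop)
    (hg : ∀ s y x, x ∈ g s y ↔ x ∈ s ∨ P y x) :
    ∀ (s : PySem.Set (Int × Int)) (x : Int × Int), x ∈ l.foldl g s ↔ x ∈ s ∨ ∃ y ∈ l, P y x := by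
  induction l with
  | nil => simp
  | cons hd tl ih =>
    intro s x
    rw [List.foldl_cons, ih, hg]
    simp only [List.mem_cons]
    constructor
    · rintro ((h | h) | ⟨y, hy, h⟩)
      · exact Or.inl h
      · exact Or.inr ⟨hd, Or.inl rfl, h⟩
      · exact Or.inr ⟨y, Or.inr hy, h⟩
    · rintro (h | ⟨y, (rfl | hy), h⟩)
      · exact Or.inl (Or.inl h)
      · exact Or.inl (Or.inr h)
      · exact Or.inr ⟨y, hy, h⟩

lemma pvNodup_foldl_set {β : Type} (l : List β) (g : PySem.Set (Int × Int) → β → PySem.Set (Int × Int))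
    (hg : ∀ s y, s.Nodup → (g s y).Nodup) :
    ∀ (s : PySem.Set (Int × Int)), s.Nodup → (l.foldl g s).Nodup := by
  induction l with
  | nil => simp
  | cons hd tl ih => intro s hs; exact ih _ (hg s hd hs)

lemma pvNodeComms_keys_nodup (cs : List (List Int)) : (pvNodeComms cs).keys.Nodup := by
  have hfold : pvNodeComms cs =
      ((PySem.List.enumerate cs 0).flatMap (fun p => p.2.map (fun x => (x, p.1)))).foldl
        (fun d q => d.modify q.1 [] (fun l => l ++ [q.2])) PySem.Dict.empty := by
    rw [List.foldl_flatMap]; simp only [List.foldl_map]; rfl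
  rw [hfold]
  exact PySem.Dict.nodup_keys_foldl_modify_key _ _ _ _ _ PySem.Dict.nodup_keys_empty

lemma pvMem_values (cs : List (List Int)) (h : Pre_find_overlapping_nodes cs)
    (idxs : List Int) (hm : idxs ∈ (pvNodeComms cs).values) :
    ∃ v : Int, idxs = pvIdxList cs v := by
  have hm' : idxs ∈ (pvNodeComms cs).items.map (fun p => p.2) := by
    simpa [PySem.Dict.values] using hm
  rw [List.mem_map] at hm'
  obtain ⟨⟨v, idxs'⟩, hv, hve⟩ := hm'
  simp only at hve
  subst hve
  have hg : (pvNodeComms cs).get? v = some idxs' :=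
    PySem.Dict.get?_of_mem_items _ hv (pvNodeComms_keys_nodup cs)
  refine ⟨v, ?_⟩
  have := pvNodeComms_getD cs h v
  rw [PySem.Dict.getD_eq_get?_getD, hg] at this
  simpa using this

lemma pvIdxList_mem_values (cs : List (List Int)) (h : Pre_find_overlapping_nodes cs)
    (v : Int) (hne : pvIdxList cs v ≠ []) :
    pvIdxList cs v ∈ (pvNodeComms cs).values := by
  have hD := pvNodeComms_getD cs h v
  rw [PySem.Dict.getD_eq_get?_getD] at hD
  cases hg : (pvNodeComms cs).get? v with
  | none => rw [hg] at hD; simp at hD; exact absurd hD hne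
  | some l =>
    rw [hg] at hD; simp at hD
    have hi := PySem.Dict.mem_items_of_get?_eq_some _ hg
    simp only [PySem.Dict.values]
    rw [← hD]
    exact List.mem_map.2 ⟨(v, l), hi, rfl⟩

lemma pvInter_ne_iff (cs : List (List Int)) (i j : Int) :
    pvInter cs i j ≠ [] ↔
      ∃ v, v ∈ PySem.List.pyGetD cs i [] ∧ v ∈ PySem.List.pyGetD cs j [] := by
  rw [← List.isEmpty_eq_false_iff, List.isEmpty_eq_false_iff_exists_mem]
  constructor
  · rintro ⟨v, hv⟩; exact ⟨v, (PySem.Set.mem_inter _ _ _).1 hv⟩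
  · rintro ⟨v, hv⟩; exact ⟨v, (PySem.Set.mem_inter _ _ _).2 hv⟩

lemma pvMem_pairsSet (cs : List (List Int)) (h : Pre_find_overlapping_nodes cs) (x : Int × Int) :
    x ∈ pvPairsSet cs ↔
      0 ≤ x.1 ∧ x.1 < x.2 ∧ x.2 < (cs.length : Int) ∧ pvInter cs x.1 x.2 ≠ [] := by
  have hmem := pvMem_foldl_set ((pvNodeComms cs).values)
    (fun s idxs =>
      (PySem.List.pyRange 0 (PySem.List.len idxs) 1).foldl
        (fun s a =>
          (PySem.List.pyRange (a + 1) (PySem.List.len idxs) 1).foldl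
            (fun s b =>
              PySem.Set.add s (PySem.List.pyGetD idxs a 0, PySem.List.pyGetD idxs b 0))
            s)
        s)
    (fun idxs x => ∃ a ∈ PySem.List.pyRange 0 (PySem.List.len idxs) 1,
        ∃ b ∈ PySem.List.pyRange (a + 1) (PySem.List.len idxs) 1,
          x = (PySem.List.pyGetD idxs a 0, PySem.List.pyGetD idxs b 0))
    (fun s idxs x => by
      rw [pvMem_foldl_set _ _
        (fun a x => ∃ b ∈ PySem.List.pyRange (a + 1) (PySem.List.len idxs) 1,
          x = (PySem.List.pyGetD idxs a 0, PySem.List.pyGetD idxs b 0))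
        (fun s a x => by
          rw [pvMem_foldl_set _ _
            (fun b x => x = (PySem.List.pyGetD idxs a 0, PySem.List.pyGetD idxs b 0))
            (fun s b x => by rw [PySem.Set.mem_add]) s x])])
  rw [pvPairsSet, hmem PySem.Set.empty x]
  simp only [PySem.Set.empty, List.not_mem_nil, false_or, PySem.List.len_eq,
    PySem.List.mem_pyRange_one]
  constructor
  · rintro ⟨idxs, hidxs, a, ⟨ha0, haL⟩, b, ⟨hab, hbL⟩, rfl⟩
    dsimp only
    obtain ⟨v, rfl⟩ := pvMem_values cs h idxs hidxs
    set idxs := pvIdxList cs v with hIdef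
    have hb0 : 0 ≤ b := le_trans (by omega) hab
    have haN : a.toNat < idxs.length := by omega
    have hbN : b.toNat < idxs.length := by omega
    have hga : PySem.List.pyGetD idxs a 0 = idxs[a.toNat] :=
      PySem.List.pyGetD_eq_getElem idxs 0 ha0 (by exact_mod_cast haL)
    have hgb : PySem.List.pyGetD idxs b 0 = idxs[b.toNat] :=
      PySem.List.pyGetD_eq_getElem idxs 0 hb0 (by exact_mod_cast hbL)
    have hlt : idxs[a.toNat] < idxs[b.toNat] := by
      have hp := pvIdxList_pairwise cs v
      exact (List.pairwise_iff_getElem.1 hp) a.toNat b.toNat haN hbN (by omega)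
    have hma : idxs[a.toNat] ∈ idxs := List.getElem_mem _
    have hmb : idxs[b.toNat] ∈ idxs := List.getElem_mem _
    rw [pvMem_idxList] at hma hmb
    obtain ⟨ka, hka, hea, hva⟩ := hma
    obtain ⟨kb, hkb, heb, hvb⟩ := hmb
    rw [hga, hgb]
    refine ⟨by rw [hea]; positivity, hlt, by rw [heb]; exact_mod_cast hkb, ?_⟩
    rw [pvInter_ne_iff]
    refine ⟨v, ?_, ?_⟩
    · rw [hea, PySem.List.pyGetD_natCast, List.getD_eq_getElem?_getD]
      simpa [hka] using hva
    · rw [heb, PySem.List.pyGetD_natCast, List.getD_eq_getElem?_getD]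
      simpa [hkb] using hvb
  · rintro ⟨h1, h2, h3, h4⟩
    rw [pvInter_ne_iff] at h4
    obtain ⟨v, hvi, hvj⟩ := h4
    have hmi : x.1 ∈ pvIdxList cs v := by
      rw [pvMem_idxList]
      refine ⟨x.1.toNat, by omega, by omega, ?_⟩
      rw [PySem.List.pyGetD_eq_getElem cs [] h1 (by omega)] at hvi
      exact hvi
    have hmj : x.2 ∈ pvIdxList cs v := by
      rw [pvMem_idxList]
      refine ⟨x.2.toNat, by omega, by omega, ?_⟩
      rw [PySem.List.pyGetD_eq_getElem cs [] (by omega) (by omega)] at hvj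
      exact hvj
    obtain ⟨a0, ha0, hea⟩ := List.getElem_of_mem hmi
    obtain ⟨b0, hb0, heb⟩ := List.getElem_of_mem hmj
    have hp := pvIdxList_pairwise cs v
    have hab : a0 < b0 := by
      rcases lt_trichotomy a0 b0 with hlt | heq | hgt
      · exact hlt
      · exfalso; subst heq; rw [hea] at heb; omega
      · exfalso
        have := (List.pairwise_iff_getElem.1 hp) b0 a0 hb0 ha0 hgt
        rw [hea, heb] at this; omega
    refine ⟨pvIdxList cs v,
      pvIdxList_mem_values cs h v (by intro hnil; rw [hnil] at hmi; simp at hmi),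
      (a0 : Int), ⟨by positivity, by exact_mod_cast ha0⟩,
      (b0 : Int), ⟨by exact_mod_cast hab, by exact_mod_cast hb0⟩, ?_⟩
    rw [PySem.List.pyGetD_eq_getElem (pvIdxList cs v) 0 (by positivity) (by exact_mod_cast ha0),
        PySem.List.pyGetD_eq_getElem (pvIdxList cs v) 0 (by positivity) (by exact_mod_cast hb0)]
    simp only [Int.toNat_natCast]
    rw [hea, heb]

lemma pvNodup_pairsSet (cs : List (List Int)) : (pvPairsSet cs).Nodup := by
  refine pvNodup_foldl_set _ _ (fun s idxs hs => ?_) PySem.Set.empty (by simp [PySem.Set.empty])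
  refine pvNodup_foldl_set _ _ (fun s a hs => ?_) s hs
  refine pvNodup_foldl_set _ _ (fun s b hs => PySem.Set.nodup_add _ _ hs) s hs

lemma pvMem_pairsList (cs : List (List Int)) (x : Int × Int) :
    x ∈ pvPairsList cs ↔
      0 ≤ x.1 ∧ x.1 < x.2 ∧ x.2 < (cs.length : Int) ∧ pvInter cs x.1 x.2 ≠ [] := by
  simp only [pvPairsList, List.mem_flatMap, List.mem_map, List.mem_filter,
    PySem.List.mem_pyRange_one, PySem.List.len_eq, decide_eq_true_eq]
  constructor
  · rintro ⟨i, ⟨hi0, hin⟩, j, ⟨⟨hij, hjn⟩, hne⟩, rfl⟩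
    exact ⟨hi0, by omega, hjn, hne⟩
  · rintro ⟨h1, h2, h3, h4⟩
    exact ⟨x.1, ⟨h1, by omega⟩, x.2, ⟨⟨by omega, h3⟩, h4⟩, rfl⟩

lemma pvPairsList_pairwise (cs : List (List Int)) :
    (pvPairsList cs).Pairwise (fun a b => toLex a < toLex b) := by
  unfold pvPairsList
  rw [List.pairwise_flatMap]
  constructor
  · intro i _
    refine List.Pairwise.map _ (fun a b hab => ?_)
      ((PySem.List.pairwise_lt_pyRange_one _ _).filter _)
    rw [Prod.Lex.toLex_lt_toLex]
    exact Or.inr ⟨rfl, hab⟩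
  · refine (PySem.List.pairwise_lt_pyRange_one _ _).imp ?_
    rintro i1 i2 h12 x hx y hy
    rw [List.mem_map] at hx hy
    obtain ⟨j1, _, rfl⟩ := hx
    obtain ⟨j2, _, rfl⟩ := hy
    rw [Prod.Lex.toLex_lt_toLex]
    exact Or.inl h12

lemma pvB_eq_canon (cs : List (List Int)) (h : Pre_find_overlapping_nodes cs) :
    find_overlapping_nodes_alt cs = pvCanon cs := by
  rw [pvAlt_eq]
  have nodupL : (pvPairsList cs).Nodup :=
    (pvPairsList_pairwise cs).imp (fun hlt => by rintro rfl; exact lt_irrefl _ hlt)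
  have hperm : (pvPairsList cs).Perm (pvPairsSet cs) :=
    (List.perm_ext_iff_of_nodup nodupL (pvNodup_pairsSet cs)).2
      (fun x => by rw [pvMem_pairsList, pvMem_pairsSet cs h])
  rw [PySem.List.sorted_eq_of_perm_of_pairwise_lt _ _ _ hperm (pvPairsList_pairwise cs)]
  rfl

-- ===== VERDICT (by name: the statement is the Claim_ definition above) =====
theorem find_overlapping_nodes_spec : Claim_equal_find_overlapping_nodes := by
  intro cs _ hpre
  unfold Spec_find_overlapping_nodes
  rw [pvA_eq_canon, pvB_eq_canon cs hpre]
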